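-- pv_equiv track=rewrite | github.com/ayushpatel497/Daily_POTD | Day200_2025/Q200_GFG.py | vowelCount
-- ===== SOURCE A (Python) =====
-- def vowelCount(s: str) -> int:
--     from math import factorial
--
--     vowels = set('aeiou')
--     freq = {}
--
--     for c in s:
--         if c in vowels:
--             freq[c] = freq.get(c, 0) + 1
--
--     if not freq:
--         return 0
--
--     choices = 1
--     for count in freq.values():
--         choices *= count
--
--     return choices * factorial(len(freq))
-- ===== SOURCE B (Python) =====
-- def vowelCount(s: str) -> int:
--     vs = [c for c in s if c in 'aeiou']
--     if not vs:
--         return 0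
--     return _collapse(vs)[0]
--
--
-- def _collapse(vs):
--     # removes one vowel species per level; the factorial of the number of
--     # distinct species emerges from the (k + 1) factor at each level
--     if not vs:
--         return 1, 0
--     v = vs[0]
--     prod, k = _collapse([x for x in vs if x != v])
--     return vs.count(v) * (k + 1) * prod, k + 1
-- ===== Notes on version B (the rewrite author's own statement) =====
-- stated objective: alternative
-- what changed: B replaces the frequency dict and the factorial call by a recursion that removes one vowel species per level (filtering out the first vowel), multiplying by that species' count and the current depth, so the factorial emerges from the recursion itself.
import Mathlib
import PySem

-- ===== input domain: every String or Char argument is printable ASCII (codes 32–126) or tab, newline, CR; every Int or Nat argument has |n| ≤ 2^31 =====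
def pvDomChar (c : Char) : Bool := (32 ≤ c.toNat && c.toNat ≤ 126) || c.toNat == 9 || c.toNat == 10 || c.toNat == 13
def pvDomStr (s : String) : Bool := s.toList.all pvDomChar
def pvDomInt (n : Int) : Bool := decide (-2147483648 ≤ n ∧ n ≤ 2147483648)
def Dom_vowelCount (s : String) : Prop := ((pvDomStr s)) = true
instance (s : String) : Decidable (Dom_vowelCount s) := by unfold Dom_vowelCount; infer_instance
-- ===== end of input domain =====

-- B replaces A's frequency dict and factorial call by a recursion that removes one vowel
-- species per level; the factorial of the number of species emerges from the recursion depth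
-- ('alternative': same asymptotic cost, different algorithm).

-- ===== PORT A =====
def vowelCount (s : String) : Int :=
  let vowels : PySem.Set Char := PySem.Set.ofList ['a', 'e', 'i', 'o', 'u']
  let freq : PySem.Dict Char Int :=
    s.toList.foldl
      (fun d c => if vowels.contains c then d.insert c (d.getD c 0 + 1) else d)
      PySem.Dict.empty
  if freq.items = [] then 0
  else
    let choices := freq.values.foldl (fun acc count => acc * count) 1
    choices * (Nat.factorial freq.size : Int)

-- ===== PORT B =====
-- helper _collapse of Source B
def vcCollapse : List Char → Int × Nat
  | [] => (1, 0)
  | v :: t =>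
      let rest := (v :: t).filter (fun x => x ≠ v)
      let pk := vcCollapse rest
      (((v :: t).count v : Int) * ((pk.2 : Int) + 1) * pk.1, pk.2 + 1)
  termination_by l => l.length
  decreasing_by
    simp only [List.filter_cons, decide_not]
    rw [if_neg (by simp)]
    exact Nat.lt_succ_of_le (List.length_filter_le _ _)

def vowelCount_alt (s : String) : Int :=
  -- 'c in "aeiou"' for a single character is membership in the vowel character list (exact)
  let vs := s.toList.filter (fun c => ['a', 'e', 'i', 'o', 'u'].contains c)
  if vs = [] then 0
  else (vcCollapse vs).1

-- ===== PRECONDITION & SPEC =====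
def Spec_vowelCount (s : String) (out : Int) : Prop := out = vowelCount_alt s
instance (s : String) (out : Int) : Decidable (Spec_vowelCount s out) := by unfold Spec_vowelCount; infer_instance

-- ===== CLAIM (what is proved, stated in full; the proofs are below) =====
def Claim_equal_vowelCount : Prop := ∀ (s : String), Dom_vowelCount s → Spec_vowelCount s (vowelCount s)

-- ===== LEMMAS AND PROOFS =====

-- the dedup of v::t is a permutation of v followed by the dedup of t with v filtered out
lemma dedup_cons_perm (v : Char) (t : List Char) :
    (PySem.List.dedup (v :: t)).Perm (v :: PySem.List.dedup (t.filter (fun x => x ≠ v))) := by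
  have hv : v ∉ PySem.List.dedup (t.filter (fun x => x ≠ v)) := by
    rw [PySem.List.mem_dedup]
    simp
  refine (List.perm_ext_iff_of_nodup (PySem.List.nodup_dedup _) (List.nodup_cons.mpr ⟨hv, PySem.List.nodup_dedup _⟩)).mpr ?_
  intro a
  simp only [PySem.List.mem_dedup, List.mem_cons, List.mem_filter, decide_eq_true_eq]
  by_cases ha : a = v <;> simp [ha]

-- vcCollapse computes (product of counts over the distinct elements) * (number of distinct)!,
-- paired with the number of distinct elements
lemma vcCollapse_spec : ∀ (vs : List Char),
    vcCollapse vs =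
      (((PySem.List.dedup vs).map (fun c => (vs.count c : Int))).prod *
        (Nat.factorial (PySem.List.dedup vs).length : Int),
       (PySem.List.dedup vs).length) := by
  intro vs
  induction hn : vs.length using Nat.strong_induction_on generalizing vs with
  | _ n ih =>
    cases vs with
    | nil => simp [vcCollapse, PySem.List.dedup]
    | cons v t =>
      have hrest : (v :: t).filter (fun x => x ≠ v) = t.filter (fun x => x ≠ v) := by
        simp
      have hlen : (t.filter (fun x => x ≠ v)).length < n := by
        subst hn
        exact Nat.lt_succ_of_le (List.length_filter_le _ _)
      have IH := ih _ hlen (t.filter (fun x => x ≠ v)) rfl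
      have hperm := dedup_cons_perm v t
      -- counts of the filtered list agree with counts in v::t on its dedup's elements
      have hmap : (PySem.List.dedup (t.filter (fun x => x ≠ v))).map
            (fun c => ((t.filter (fun x => x ≠ v)).count c : Int))
          = (PySem.List.dedup (t.filter (fun x => x ≠ v))).map
            (fun c => ((v :: t).count c : Int)) := by
        refine List.map_congr_left ?_
        intro c hc
        rw [PySem.List.mem_dedup, List.mem_filter] at hc
        have hcv : (c ≠ v) := by simpa using hc.2
        congr 1
        rw [List.count_filter (by simpa using hcv), List.count_cons]
        simp [Ne.symm hcv]
      rw [vcCollapse, hrest, IH]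
      have hL : (PySem.List.dedup (v :: t)).length
          = (PySem.List.dedup (t.filter (fun x => x ≠ v))).length + 1 := by
        simpa using hperm.length_eq
      have hP : ((PySem.List.dedup (v :: t)).map (fun c => ((v :: t).count c : Int))).prod
          = ((v :: t).count v : Int) *
            ((PySem.List.dedup (t.filter (fun x => x ≠ v))).map (fun c => ((v :: t).count c : Int))).prod := by
        rw [(hperm.map (fun c => ((v :: t).count c : Int))).prod_eq]
        simp [List.map_cons]
      refine Prod.ext ?_ ?_
      · simp only [hP, ← hmap, hL, Nat.factorial_succ]
        push_cast
        ring
      · simpa using hL.symm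

-- the two vowel-filter predicates coincide
lemma vowel_pred_eq :
    (PySem.Set.ofList ['a','e','i','o','u'] : PySem.Set Char).contains
      = (fun c => ['a','e','i','o','u'].contains c) := by
  funext c
  simp [pysem]

-- the main equivalence
lemma vowelCount_eq_alt (s : String) : vowelCount s = vowelCount_alt s := by
  unfold vowelCount vowelCount_alt
  simp only []
  rw [show (fun (d : PySem.Dict Char Int) (c : Char) =>
        if (PySem.Set.ofList ['a','e','i','o','u'] : PySem.Set Char).contains c
        then d.insert c (d.getD c 0 + 1) else d)
      = (fun d c => if (PySem.Set.ofList ['a','e','i','o','u'] : PySem.Set Char).contains c = true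
        then d.insert c (d.getD c 0 + 1) else d) from rfl,
    ← List.foldl_filter, vowel_pred_eq, PySem.Dict.foldl_insert_getD_add_one_eq_counter]
  set fl := s.toList.filter (fun c => ['a','e','i','o','u'].contains c) with hfl
  rw [vcCollapse_spec fl]
  simp only [PySem.Dict.values, PySem.Dict.size, PySem.Dict.items_counter, List.map_map,
    List.map_eq_nil_iff, List.length_map, PySem.List.dedup_eq_ofList]
  have hvals : (PySem.Set.ofList fl : List Char).map
        ((fun (x : Char × Int) => x.2) ∘ fun k => (k, ((fl.count k : Nat) : Int)))
      = (PySem.Set.ofList fl : List Char).map (fun k => ((fl.count k : Nat) : Int)) := rfl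
  rw [hvals, ← List.prod_eq_foldl]
  have hnil : ((PySem.Set.ofList fl : List Char) = []) ↔ (fl = []) := by
    constructor
    · intro h
      rcases List.eq_nil_or_concat fl with h' | ⟨l, a, h'⟩
      · exact h'
      · exfalso
        have : a ∈ (PySem.Set.ofList fl : List Char) := by
          rw [PySem.Set.mem_ofList]; simp [h']
        simp [h] at this
    · intro h; simp [h, PySem.Set.ofList]
  by_cases hKe : fl = []
  · rw [if_pos (hnil.mpr hKe), if_pos hKe]
  · rw [if_neg (fun h => hKe (hnil.mp h)), if_neg hKe]

-- ===== VERDICT (by name: the statement is the Claim_ definition above) =====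
theorem vowelCount_spec : Claim_equal_vowelCount := by
  intro s _
  unfold Spec_vowelCount
  exact vowelCount_eq_alt s
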